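-- pv_equiv track=rewrite | github.com/ssins/clyh | App/Index/controllers.py | getAllMethods
-- ===== SOURCE A (Python) =====
-- def getAllMethods(source_len_list, target_len_dict):
--     source_len_list.sort()
--     methods = [[0] * len(target_len_dict)]
--     methods_len = [0, ]
--     values = [0, ]
--     for idx, (length, max_count) in enumerate(target_len_dict.items()):
--         new_methods = []
--         new_values = []
--         new_methods_len = []
--         for count in range(1, max_count + 1):
--             for i, method in enumerate(methods):
--                 tmp_value = values[i] + length*count
--                 for source_len in source_len_list:
--                     if tmp_value <= source_len:
--                         tmp_method = method[:]
--                         tmp_method[idx] = count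
--                         new_methods.append(tmp_method)
--                         new_values.append(tmp_value)
--                         new_methods_len.append(source_len)
--                         break
--         methods += new_methods
--         methods_len += new_methods_len
--         values += new_values
--     return methods, methods_len
-- ===== SOURCE B (Python) =====
-- def _first_ge(srcs, v):
--     # hand-written bisect_left on the sorted list; returns srcs[lo]
--     lo, hi = 0, len(srcs)
--     while lo < hi:
--         mid = (lo + hi) // 2
--         if srcs[mid] < v:
--             lo = mid + 1
--         else:
--             hi = mid
--     return srcs[lo]
--
-- def getAllMethods(source_len_list, target_len_dict):
--     # NOTE: like the original, this sorts source_len_list in place.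
--     source_len_list.sort()
--     cap = source_len_list[-1] if source_len_list else None
--     k = len(target_len_dict)
--     # single list of (counts-vector, value) pairs; feasibility during
--     # generation is just a comparison against the largest source length
--     pairs = [([0] * k, 0)]
--     for idx, (length, max_count) in enumerate(target_len_dict.items()):
--         pairs = pairs + [
--             (m[:idx] + [c] + m[idx + 1:], v + length * c)
--             for c in range(1, max_count + 1)
--             for (m, v) in pairs
--             if cap is not None and v + length * c <= cap
--         ]
--     # the fitting source length of every generated value is recovered in
--     # one final binary-search pass (the seed entry keeps its literal 0)
--     return [m for m, _ in pairs], [0] + [_first_ge(source_len_list, v) for _, v in pairs[1:]]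
-- ===== Notes on version B (the rewrite author's own statement) =====
-- stated objective: alternative
-- what changed: B maintains one list of (counts-vector, value) pairs built by per-layer list comprehensions (splicing the count in with slices) instead of A's three parallel append-lists indexed via enumerate, decides feasibility by a single comparison against the largest source length instead of A's inner first-fit scan, and recovers all fitting source lengths afterwards in one final binary-search pass over the values.
import Mathlib
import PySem

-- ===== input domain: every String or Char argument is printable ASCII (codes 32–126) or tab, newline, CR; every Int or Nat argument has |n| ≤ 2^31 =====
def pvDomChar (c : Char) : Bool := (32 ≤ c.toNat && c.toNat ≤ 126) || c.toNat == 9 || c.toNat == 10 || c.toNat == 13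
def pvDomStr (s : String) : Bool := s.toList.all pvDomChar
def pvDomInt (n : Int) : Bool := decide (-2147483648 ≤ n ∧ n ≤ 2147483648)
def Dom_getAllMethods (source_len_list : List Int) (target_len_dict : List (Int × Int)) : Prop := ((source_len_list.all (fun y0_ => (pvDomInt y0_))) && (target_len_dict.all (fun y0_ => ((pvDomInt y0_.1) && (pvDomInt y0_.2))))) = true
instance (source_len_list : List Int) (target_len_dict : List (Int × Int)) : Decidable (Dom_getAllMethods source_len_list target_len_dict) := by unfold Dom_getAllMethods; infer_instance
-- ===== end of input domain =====

-- B keeps one list of (counts-vector, value) pairs, tests feasibility against the largest source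
-- length only, and recovers every fitting source length in a single final binary-search pass;
-- equivalence is about the RETURN value (both A and B sort source_len_list in place, the same
-- observable mutation).

-- ===== PORT A =====
-- state: (methods, methods_len, values)
def pvA_body (srcs : List Int) (st : List (List Int) × List Int × List Int)
    (p : Int × (Int × Int)) : List (List Int) × List Int × List Int :=
  -- the three new_* accumulators, in A's order (new_methods, new_values, new_methods_len)
  let nmv :=
    (PySem.List.pyRange 1 (p.2.2 + 1)).foldl (fun acc count =>
      (PySem.List.enumerate st.1).foldl (fun acc2 q =>
        -- values[i]: i is always in range (len(values) = len(methods)), so pyGetD is exact here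
        let tmp_value := PySem.List.pyGetD st.2.2 q.1 0 + p.2.1 * count
        -- 'for source_len in srcs: if tmp_value <= source_len: …; break' = first match
        match srcs.find? (fun s => decide (tmp_value ≤ s)) with
        | some source_len =>
            -- tmp_method = method[:]; tmp_method[idx] = count  (idx from enumerate is ≥ 0)
            (acc2.1 ++ [q.2.set p.1.toNat count], acc2.2.1 ++ [tmp_value], acc2.2.2 ++ [source_len])
        | none => acc2) acc) ([], [], [])
  (st.1 ++ nmv.1, st.2.1 ++ nmv.2.2, st.2.2 ++ nmv.2.1)

def getAllMethods (source_len_list : List Int) (target_len_dict : List (Int × Int)) :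
    List (List Int) × List Int :=
  let srcs := PySem.List.sorted source_len_list (fun x => x)
  let d := PySem.Dict.ofList target_len_dict
  let fin := (PySem.List.enumerate d.items).foldl (pvA_body srcs)
    ([List.replicate d.size (0 : Int)], [0], [0])
  (fin.1, fin.2.1)

-- ===== PORT B =====
-- _first_ge: Source B's lo/hi halving loop is exactly bisect_left, which PySem owns;
-- srcs[lo] is only ever asked for values known to fit, so getD is exact there
def pvFirstGE (srcs : List Int) (v : Int) : Int :=
  srcs.getD (PySem.List.bisectLeft srcs v) 0

-- one layer: pairs + the comprehension (c outer, (m, v) inner, guarded by the cap test);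
-- m[:idx] + [c] + m[idx+1:] is the take/append/drop splice
def pvB_layer (cap : Option Int) (pairs : List (List Int × Int)) (p : Int × (Int × Int)) :
    List (List Int × Int) :=
  pairs ++ (PySem.List.pyRange 1 (p.2.2 + 1)).flatMap (fun c =>
    pairs.filterMap (fun mv =>
      if (match cap with | some m => decide (mv.2 + p.2.1 * c ≤ m) | none => false)
      then some (mv.1.take p.1.toNat ++ [c] ++ mv.1.drop (p.1.toNat + 1), mv.2 + p.2.1 * c)
      else none))

-- the for-loop over enumerate(d.items()), rebinding pairs each round
def pvB_go (cap : Option Int) : List (Int × (Int × Int)) → List (List Int × Int) →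
    List (List Int × Int)
  | [], pairs => pairs
  | p :: rest, pairs => pvB_go cap rest (pvB_layer cap pairs p)

def getAllMethods_alt (source_len_list : List Int) (target_len_dict : List (Int × Int)) :
    List (List Int) × List Int :=
  let srcs := PySem.List.sorted source_len_list (fun x => x)
  let cap := srcs.getLast?          -- source_len_list[-1] if source_len_list else None
  let d := PySem.Dict.ofList target_len_dict
  let pairs := pvB_go cap (PySem.List.enumerate d.items)
    [(List.replicate d.size (0 : Int), 0)]
  (pairs.map (·.1), 0 :: (pairs.drop 1).map (fun mv => pvFirstGE srcs mv.2))

-- ===== PRECONDITION & SPEC =====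
def Spec_getAllMethods (source_len_list : List Int) (target_len_dict : List (Int × Int)) (out : List (List Int) × List Int) : Prop := out = getAllMethods_alt source_len_list target_len_dict
instance (source_len_list : List Int) (target_len_dict : List (Int × Int)) (out : List (List Int) × List Int) : Decidable (Spec_getAllMethods source_len_list target_len_dict out) := by unfold Spec_getAllMethods; infer_instance

-- ===== CLAIM (what is proved, stated in full; the proofs are below) =====
def Claim_equal_getAllMethods : Prop := ∀ (source_len_list : List Int) (target_len_dict : List (Int × Int)), Dom_getAllMethods source_len_list target_len_dict → Spec_getAllMethods source_len_list target_len_dict (getAllMethods source_len_list target_len_dict)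

-- ===== LEMMAS AND PROOFS =====

-- find? returns the element at the first index r whose prefix all fails the test
theorem pv_find?_eq_getElem? (xs : List Int) (p : Int → Bool) (r : Nat) (hr : r ≤ xs.length)
    (h1 : ∀ j (hj : j < xs.length), j < r → p xs[j] = false)
    (h2 : ∀ j (hj : j < xs.length), r ≤ j → p xs[j] = true) :
    xs.find? p = xs[r]? := by
  induction xs generalizing r with
  | nil => simp
  | cons x xs ih =>
    cases r with
    | zero =>
      have hx : p x = true := h2 0 (by simp) (Nat.zero_le _)
      simp [List.find?_cons_of_pos hx]
    | succ r' =>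
      have hx : p x = false := h1 0 (by simp) (Nat.succ_pos _)
      rw [List.find?_cons_of_neg (by simp [hx]), List.getElem?_cons_succ]
      exact ih r' (by simpa using hr)
        (fun j hj hlt => h1 (j+1) (by simpa using hj) (by omega))
        (fun j hj hge => h2 (j+1) (by simpa using hj) (by omega))

-- on a sorted list, A's first-match scan equals a binary search lookup
theorem pv_find?_eq_bisect (srcs : List Int) (hs : srcs.Pairwise (· ≤ ·)) (v : Int) :
    srcs.find? (fun s => decide (v ≤ s)) = srcs[PySem.List.bisectLeft srcs v]? := by
  obtain ⟨hle, hlt, hge⟩ := PySem.List.bisectLeft_spec srcs v hs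
  exact pv_find?_eq_getElem? srcs _ _ hle
    (fun j hj h => by simpa using not_le.mpr (hlt j hj h))
    (fun j hj h => by simpa using hge j hj h)

-- the cap test of B is exactly 'the binary search lands inside the list'
theorem pv_cap_iff (srcs : List Int) (hs : srcs.Pairwise (· ≤ ·)) (v : Int) :
    (match srcs.getLast? with | some m => decide (v ≤ m) | none => false) =
      decide (PySem.List.bisectLeft srcs v < srcs.length) := by
  obtain ⟨hle, hlt, hge⟩ := PySem.List.bisectLeft_spec srcs v hs
  cases hsrcs : srcs with
  | nil => subst hsrcs; simp at hle; simp
  | cons x xs =>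
    have hne : srcs ≠ [] := by simp [hsrcs]
    rw [← hsrcs]
    have hlen : 0 < srcs.length := by simp [hsrcs]
    rw [List.getLast?_eq_getElem? , List.getElem?_eq_getElem (by omega : srcs.length - 1 < srcs.length)]
    simp only []
    by_cases h : PySem.List.bisectLeft srcs v < srcs.length
    · have := hge (srcs.length - 1) (by omega) (by omega)
      simp [h, this]
    · have heq : PySem.List.bisectLeft srcs v = srcs.length := by omega
      have := hlt (srcs.length - 1) (by omega) (by omega)
      simp [h]; omega

-- combined: A's first-match scan = (if cap test then the bisected element else nothing)
theorem pv_find?_eq_capfit (srcs : List Int) (hs : srcs.Pairwise (· ≤ ·)) (v : Int) :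
    srcs.find? (fun s => decide (v ≤ s)) =
      (if (match srcs.getLast? with | some m => decide (v ≤ m) | none => false) = true
       then some (pvFirstGE srcs v) else none) := by
  rw [pv_find?_eq_bisect srcs hs v, pv_cap_iff srcs hs v]
  by_cases h : PySem.List.bisectLeft srcs v < srcs.length
  · rw [List.getElem?_eq_getElem h]
    simp [h, pvFirstGE]
  · rw [List.getElem?_eq_none (by omega)]
    simp [h]

-- list.set = the take/[c]/drop splice when the index is in range
theorem pv_set_eq_splice (m : List Int) (n : Nat) (c : Int) (h : n < m.length) :
    m.set n c = m.take n ++ [c] ++ m.drop (n + 1) := by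
  rw [List.set_eq_take_cons_drop c h]; simp

-- zip with the values list = enumerate with a pyGetD lookup (lengths agree)
theorem pv_zip_eq_enumerate (ms : List (List Int)) : ∀ (vs : List Int) (s : Nat),
    s + ms.length ≤ vs.length →
    ms.zip (vs.drop s) =
      (PySem.List.enumerate ms (s : Int)).map (fun q => (q.2, PySem.List.pyGetD vs q.1 0)) := by
  induction ms with
  | nil => simp [PySem.List.enumerate_nil]
  | cons m ms ih =>
    intro vs s h
    have hs : s < vs.length := by simp at h; omega
    rw [List.drop_eq_getElem_cons hs, PySem.List.enumerate_cons]
    simp only [List.zip_cons_cons, List.map_cons]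
    have hhead : PySem.List.pyGetD vs (s : Int) 0 = vs[s] := by
      rw [PySem.List.pyGetD_natCast]; exact List.getD_eq_getElem vs 0 hs
    rw [hhead]
    congr 1
    have := ih vs (s + 1) (by simp at h ⊢; omega)
    rw [show ((s : Int) + 1) = ((s + 1 : Nat) : Int) by push_cast; ring]
    exact this

-- A's fold over enumerate(methods) with values-lookup = a fold over the pair list itself
theorem pv_enum_eq_pairs {β : Type} (P : List (List Int × Int))
    (f : β → (List Int × Int) → β) (a : β) :
    (PySem.List.enumerate (P.map Prod.fst)).foldl
        (fun acc q => f acc (q.2, PySem.List.pyGetD (P.map Prod.snd) q.1 0)) a =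
      P.foldl f a := by
  have hz : (P.map Prod.fst).zip (P.map Prod.snd) = P :=
    (List.zip_of_prod rfl rfl).symm
  have he := pv_zip_eq_enumerate (P.map Prod.fst) (P.map Prod.snd) 0 (by simp)
  simp only [List.drop_zero, Nat.cast_zero] at he
  calc (PySem.List.enumerate (P.map Prod.fst)).foldl
        (fun acc q => f acc (q.2, PySem.List.pyGetD (P.map Prod.snd) q.1 0)) a
      = ((PySem.List.enumerate (P.map Prod.fst)).map
          (fun q => (q.2, PySem.List.pyGetD (P.map Prod.snd) q.1 0))).foldl f a := by
        rw [List.foldl_map]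
    _ = ((P.map Prod.fst).zip (P.map Prod.snd)).foldl f a := by rw [he]
    _ = P.foldl f a := by rw [hz]

-- one inner row (fixed count): A's triple-accumulator fold over the pair list builds
-- exactly the three projections of B's filterMap
theorem pv_inner (srcs : List Int) (hs : srcs.Pairwise (· ≤ ·)) (idx length c : Int) (k : Nat)
    (hidx : idx.toNat < k) :
    ∀ (P : List (List Int × Int)), (∀ mv ∈ P, mv.1.length = k) →
    ∀ (E : List (List Int × Int)),
    P.foldl (fun acc2 mv =>
        match srcs.find? (fun s => decide (mv.2 + length * c ≤ s)) with
        | some source_len =>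
            (acc2.1 ++ [mv.1.set idx.toNat c], acc2.2.1 ++ [mv.2 + length * c],
             acc2.2.2 ++ [source_len])
        | none => acc2)
      (E.map Prod.fst, E.map Prod.snd, E.map (fun (e : List Int × Int) => pvFirstGE srcs e.2)) =
    (((E ++ P.filterMap (fun (mv : List Int × Int) =>
        if (match srcs.getLast? with | some m => decide (mv.2 + length * c ≤ m) | none => false)
        then some (mv.1.take idx.toNat ++ [c] ++ mv.1.drop (idx.toNat + 1), mv.2 + length * c)
        else none))).map Prod.fst,
     ((E ++ P.filterMap (fun (mv : List Int × Int) =>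
        if (match srcs.getLast? with | some m => decide (mv.2 + length * c ≤ m) | none => false)
        then some (mv.1.take idx.toNat ++ [c] ++ mv.1.drop (idx.toNat + 1), mv.2 + length * c)
        else none))).map Prod.snd,
     ((E ++ P.filterMap (fun (mv : List Int × Int) =>
        if (match srcs.getLast? with | some m => decide (mv.2 + length * c ≤ m) | none => false)
        then some (mv.1.take idx.toNat ++ [c] ++ mv.1.drop (idx.toNat + 1), mv.2 + length * c)
        else none))).map (fun (e : List Int × Int) => pvFirstGE srcs e.2)) := by
  intro P
  induction P with
  | nil => intro _ E; simp
  | cons mv P ih =>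
    intro hlen E
    have hmv : mv.1.length = k := hlen mv (by simp)
    have hspl : mv.1.set idx.toNat c =
        mv.1.take idx.toNat ++ [c] ++ mv.1.drop (idx.toNat + 1) :=
      pv_set_eq_splice mv.1 idx.toNat c (by omega)
    rw [List.foldl_cons, List.filterMap_cons,
        pv_find?_eq_capfit srcs hs (mv.2 + length * c)]
    by_cases h : (match srcs.getLast? with
        | some m => decide (mv.2 + length * c ≤ m) | none => false) = true
    · simp only [h, if_true]
      have := ih (fun x hx => hlen x (by simp [hx]))
        (E ++ [(mv.1.take idx.toNat ++ [c] ++ mv.1.drop (idx.toNat + 1), mv.2 + length * c)])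
      simpa [hspl] using this
    · simp only [h]
      exact ih (fun x hx => hlen x (by simp [hx])) E

-- one whole layer (all counts): A's three new_* lists are the projections of B's flatMap
theorem pv_layer (srcs : List Int) (hs : srcs.Pairwise (· ≤ ·)) (idx length : Int) (k : Nat)
    (hidx : idx.toNat < k) (P : List (List Int × Int)) (hlen : ∀ mv ∈ P, mv.1.length = k) :
    ∀ (counts : List Int) (E : List (List Int × Int)),
    counts.foldl (fun acc c =>
        P.foldl (fun acc2 mv =>
          match srcs.find? (fun s => decide (mv.2 + length * c ≤ s)) with
          | some source_len =>
              (acc2.1 ++ [mv.1.set idx.toNat c], acc2.2.1 ++ [mv.2 + length * c],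
               acc2.2.2 ++ [source_len])
          | none => acc2) acc)
      (E.map Prod.fst, E.map Prod.snd, E.map (fun (e : List Int × Int) => pvFirstGE srcs e.2)) =
    (((E ++ counts.flatMap (fun c => P.filterMap (fun (mv : List Int × Int) =>
        if (match srcs.getLast? with | some m => decide (mv.2 + length * c ≤ m) | none => false)
        then some (mv.1.take idx.toNat ++ [c] ++ mv.1.drop (idx.toNat + 1), mv.2 + length * c)
        else none)))).map Prod.fst,
     ((E ++ counts.flatMap (fun c => P.filterMap (fun (mv : List Int × Int) =>
        if (match srcs.getLast? with | some m => decide (mv.2 + length * c ≤ m) | none => false)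
        then some (mv.1.take idx.toNat ++ [c] ++ mv.1.drop (idx.toNat + 1), mv.2 + length * c)
        else none)))).map Prod.snd,
     ((E ++ counts.flatMap (fun c => P.filterMap (fun (mv : List Int × Int) =>
        if (match srcs.getLast? with | some m => decide (mv.2 + length * c ≤ m) | none => false)
        then some (mv.1.take idx.toNat ++ [c] ++ mv.1.drop (idx.toNat + 1), mv.2 + length * c)
        else none)))).map (fun (e : List Int × Int) => pvFirstGE srcs e.2)) := by
  intro counts
  induction counts with
  | nil => intro E; simp
  | cons c counts ih =>
    intro E
    rw [List.foldl_cons, pv_inner srcs hs idx length c k hidx P hlen E]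
    rw [List.flatMap_cons]
    have := ih (E ++ P.filterMap (fun (mv : List Int × Int) =>
        if (match srcs.getLast? with | some m => decide (mv.2 + length * c ≤ m) | none => false)
        then some (mv.1.take idx.toNat ++ [c] ++ mv.1.drop (idx.toNat + 1), mv.2 + length * c)
        else none))
    simpa [List.append_assoc] using this

-- every pair produced by one of B's layers keeps a counts-vector of length k
theorem pv_layer_len (cap : Option Int) (k : Nat) (P : List (List Int × Int))
    (p : Int × (Int × Int)) (hidx : p.1.toNat < k) (hlen : ∀ mv ∈ P, mv.1.length = k) :
    ∀ mv ∈ pvB_layer cap P p, mv.1.length = k := by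
  intro mv hmv
  rw [pvB_layer, List.mem_append] at hmv
  rcases hmv with h | h
  · exact hlen mv h
  · rw [List.mem_flatMap] at h
    obtain ⟨c, _, hmem⟩ := h
    rw [List.mem_filterMap] at hmem
    obtain ⟨mv0, hmv0, heq⟩ := hmem
    have h0 : mv0.1.length = k := hlen mv0 hmv0
    cases hcb : (match cap with | some m => decide (mv0.2 + p.2.1 * c ≤ m) | none => false) with
    | true =>
      rw [hcb, if_pos rfl] at heq
      have hmveq := (Option.some.inj heq).symm
      rw [hmveq]
      show (mv0.1.take p.1.toNat ++ [c] ++ mv0.1.drop (p.1.toNat + 1)).length = k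
      rw [← pv_set_eq_splice mv0.1 p.1.toNat c (by omega), List.length_set]
      exact h0
    | false =>
      rw [hcb] at heq
      simp at heq

-- one outer step: A's body on the projected state = the projections of B's layer
theorem pv_body_eq (srcs : List Int) (hs : srcs.Pairwise (· ≤ ·)) (k : Nat)
    (P : List (List Int × Int)) (hlen : ∀ mv ∈ P, mv.1.length = k)
    (p : Int × (Int × Int)) (hp : p.1.toNat < k) (ml : List Int) :
    pvA_body srcs (P.map Prod.fst, ml, P.map Prod.snd) p =
      ((pvB_layer srcs.getLast? P p).map Prod.fst,
       ml ++ ((PySem.List.pyRange 1 (p.2.2 + 1)).flatMap (fun c =>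
         P.filterMap (fun (mv : List Int × Int) =>
           if (match srcs.getLast? with | some m => decide (mv.2 + p.2.1 * c ≤ m) | none => false)
           then some (mv.1.take p.1.toNat ++ [c] ++ mv.1.drop (p.1.toNat + 1), mv.2 + p.2.1 * c)
           else none))).map (fun (e : List Int × Int) => pvFirstGE srcs e.2),
       (pvB_layer srcs.getLast? P p).map Prod.snd) := by
  have hfun : (fun (acc : List (List Int) × List Int × List Int) (count : Int) =>
        (PySem.List.enumerate (P.map Prod.fst)).foldl (fun acc2 q =>
          let tmp_value := PySem.List.pyGetD (P.map Prod.snd) q.1 0 + p.2.1 * count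
          match srcs.find? (fun s => decide (tmp_value ≤ s)) with
          | some source_len =>
              (acc2.1 ++ [q.2.set p.1.toNat count], acc2.2.1 ++ [tmp_value],
               acc2.2.2 ++ [source_len])
          | none => acc2) acc) =
      (fun acc count => P.foldl (fun acc2 (mv : List Int × Int) =>
          match srcs.find? (fun s => decide (mv.2 + p.2.1 * count ≤ s)) with
          | some source_len =>
              (acc2.1 ++ [mv.1.set p.1.toNat count], acc2.2.1 ++ [mv.2 + p.2.1 * count],
               acc2.2.2 ++ [source_len])
          | none => acc2) acc) := by
    funext acc count
    exact pv_enum_eq_pairs P (fun acc2 (mv : List Int × Int) =>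
        match srcs.find? (fun s => decide (mv.2 + p.2.1 * count ≤ s)) with
        | some source_len =>
            (acc2.1 ++ [mv.1.set p.1.toNat count], acc2.2.1 ++ [mv.2 + p.2.1 * count],
             acc2.2.2 ++ [source_len])
        | none => acc2) acc
  have hlayer := pv_layer srcs hs p.1 p.2.1 k hp P hlen
    (PySem.List.pyRange 1 (p.2.2 + 1)) []
  simp only [List.map_nil, List.nil_append] at hlayer
  show (_, _, _) = _
  simp only [hfun, hlayer, pvB_layer, List.map_append]

-- the outer loop: A's three parallel lists are the projections of B's pair list,
-- with the methods_len list recovered from the values by pvFirstGE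
theorem pv_outer (srcs : List Int) (hs : srcs.Pairwise (· ≤ ·)) (k : Nat) :
    ∀ (L : List (Int × (Int × Int))), (∀ p ∈ L, p.1.toNat < k) →
    ∀ (P : List (List Int × Int)), P ≠ [] → (∀ mv ∈ P, mv.1.length = k) →
    L.foldl (pvA_body srcs)
      (P.map Prod.fst, 0 :: (P.drop 1).map (fun (mv : List Int × Int) => pvFirstGE srcs mv.2),
       P.map Prod.snd) =
    ((pvB_go srcs.getLast? L P).map Prod.fst,
     0 :: ((pvB_go srcs.getLast? L P).drop 1).map
        (fun (mv : List Int × Int) => pvFirstGE srcs mv.2),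
     (pvB_go srcs.getLast? L P).map Prod.snd) := by
  intro L
  induction L with
  | nil => intro _ P _ _; rfl
  | cons p L ih =>
    intro hidx P hne hlen
    have hp : p.1.toNat < k := hidx p (by simp)
    rw [List.foldl_cons, pvB_go,
        pv_body_eq srcs hs k P hlen p hp
          (0 :: (P.drop 1).map (fun (mv : List Int × Int) => pvFirstGE srcs mv.2))]
    have hml : (0 :: (P.drop 1).map (fun (mv : List Int × Int) => pvFirstGE srcs mv.2)) ++
        ((PySem.List.pyRange 1 (p.2.2 + 1)).flatMap (fun c =>
          P.filterMap (fun (mv : List Int × Int) =>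
            if (match srcs.getLast? with | some m => decide (mv.2 + p.2.1 * c ≤ m) | none => false)
            then some (mv.1.take p.1.toNat ++ [c] ++ mv.1.drop (p.1.toNat + 1), mv.2 + p.2.1 * c)
            else none))).map (fun (e : List Int × Int) => pvFirstGE srcs e.2) =
        0 :: ((pvB_layer srcs.getLast? P p).drop 1).map
          (fun (mv : List Int × Int) => pvFirstGE srcs mv.2) := by
      rw [pvB_layer, List.drop_append_of_le_length (by
        cases P with | nil => exact absurd rfl hne | cons a b => simp)]
      simp [List.map_append]
    rw [hml]
    have hne' : pvB_layer srcs.getLast? P p ≠ [] := by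
      rw [pvB_layer]; intro h
      exact hne (List.append_eq_nil_iff.mp h).1
    exact ih (fun q hq => hidx q (by simp [hq])) _ hne'
      (pv_layer_len srcs.getLast? k P p hp hlen)

-- ===== VERDICT (by name: the statement is the Claim_ definition above) =====
theorem getAllMethods_spec : Claim_equal_getAllMethods := by
  intro source_len_list target_len_dict _
  show _ = _
  rw [getAllMethods, getAllMethods_alt]
  have hs : (PySem.List.sorted source_len_list (fun x => x)).Pairwise (· ≤ ·) :=
    PySem.List.sorted_pairwise source_len_list (fun x => x)
  have hidx : ∀ p ∈ PySem.List.enumerate (PySem.Dict.ofList target_len_dict).items,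
      p.1.toNat < (PySem.Dict.ofList target_len_dict).size := by
    intro p hp
    rw [PySem.List.mem_enumerate_iff] at hp
    obtain ⟨j, hj, rfl⟩ := hp
    simp only [PySem.Dict.size]
    simpa using hj
  have key := pv_outer (PySem.List.sorted source_len_list (fun x => x)) hs
    (PySem.Dict.ofList target_len_dict).size
    (PySem.List.enumerate (PySem.Dict.ofList target_len_dict).items) hidx
    [(List.replicate (PySem.Dict.ofList target_len_dict).size (0 : Int), 0)]
    (by simp) (by simp)
  simp only [List.map_cons, List.map_nil, List.drop_succ_cons, List.drop_zero] at key
  rw [key]
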